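-- pv_equiv track=rewrite | github.com/jyh4479/Daily_Algorithm | Programmers/2018kakao/[1차]뉴스클러스터링.py | multi_set
-- ===== SOURCE A (Python) =====
-- def multi_set(string):
--     ans_list=[]
--     for i in range(len(string)-1):
--         sub_string=string[i:i+2]
--         if sub_string[0]<'A' or sub_string[0]>'Z' or sub_string[1]<'A' or sub_string[1]>'Z':
--             continue
--         ans_list.append(sub_string)
--     return ans_list
-- ===== SOURCE B (Python) =====
-- def multi_set(string):
--     # Stage 1: split the string into maximal runs of uppercase ASCII letters.
--     runs = []
--     cur = []
--     for c in string:
--         if 'A' <= c <= 'Z':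
--             cur.append(c)
--         else:
--             if cur:
--                 runs.append(cur)
--                 cur = []
--     if cur:
--         runs.append(cur)
--     # Stage 2: each run of length L contributes its L-1 adjacent pairs.
--     return [run[i] + run[i + 1] for run in runs for i in range(len(run) - 1)]
-- ===== Notes on version B (the rewrite author's own statement) =====
-- stated objective: faster
-- what changed: Replaces A's indexed sliding-window pass (a 2-char slice and four ordered comparisons per position) by a two-stage algorithm: first split the string into maximal uppercase runs (one range check per character), then expand each run of length L into its L-1 adjacent pairs with no per-pair filtering.
import Mathlib
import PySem

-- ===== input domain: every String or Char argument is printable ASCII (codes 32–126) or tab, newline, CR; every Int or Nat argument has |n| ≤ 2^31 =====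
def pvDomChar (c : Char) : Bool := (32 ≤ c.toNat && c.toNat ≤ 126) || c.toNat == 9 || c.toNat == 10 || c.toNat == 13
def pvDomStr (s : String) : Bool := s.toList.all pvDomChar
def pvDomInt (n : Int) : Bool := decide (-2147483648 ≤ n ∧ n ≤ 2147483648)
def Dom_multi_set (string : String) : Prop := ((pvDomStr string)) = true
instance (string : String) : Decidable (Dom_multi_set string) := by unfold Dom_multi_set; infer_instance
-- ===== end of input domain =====

-- B replaces A's indexed sliding-window scan with per-pair range checks by a two-stage
-- algorithm (split into maximal uppercase runs, then expand each run into its adjacent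
-- pairs); a genuinely different decomposition of the same O(n) task.

-- ===== PORT A =====
-- index loop: for i in range(len(string)-1): sub = string[i:i+2]; skip unless both chars in 'A'..'Z'.
-- sub always has exactly 2 chars here, so Python's sub[0]/sub[1] never raise; pyGetD's default is unreachable.
def multi_set (string : String) : List String :=
  (PySem.List.pyRange 0 (PySem.Str.len string - 1) 1).foldl
    (fun ans_list i =>
      let sub := PySem.List.slice string.toList (some i) (some (i + 2))
      if PySem.List.pyGetD sub 0 'A' < 'A' || PySem.List.pyGetD sub 0 'A' > 'Z' ||
         PySem.List.pyGetD sub 1 'A' < 'A' || PySem.List.pyGetD sub 1 'A' > 'Z' then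
        ans_list
      else
        ans_list ++ [String.ofList sub]) []

-- ===== PORT B =====
-- the 'A' <= c <= 'Z' test of Source B
def pvIsUp (c : Char) : Bool := decide ('A' ≤ c) && decide (c ≤ 'Z')

-- Stage 1 of Source B: the character loop splitting the string into maximal uppercase runs
-- (cur is the run being built; a finished nonempty run is emitted in order).
def pvRuns : List Char → List Char → List (List Char)
  | [], cur => if cur.isEmpty then [] else [cur]
  | c :: rest, cur =>
    if pvIsUp c then pvRuns rest (cur ++ [c])
    else if cur.isEmpty then pvRuns rest []
    else cur :: pvRuns rest []

-- Stage 2 of Source B: run[i] + run[i+1] for i in range(len(run) - 1); indices always in range.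
def pvExpand (run : List Char) : List String :=
  (List.range (run.length - 1)).map (fun i => String.ofList [run.getD i 'A', run.getD (i + 1) 'A'])

def multi_set_alt (string : String) : List String :=
  (pvRuns string.toList []).flatMap pvExpand

-- ===== PRECONDITION & SPEC =====
def Spec_multi_set (string : String) (out : List String) : Prop := out = multi_set_alt string
instance (string : String) (out : List String) : Decidable (Spec_multi_set string out) := by unfold Spec_multi_set; infer_instance

-- ===== CLAIM (what is proved, stated in full; the proofs are below) =====
def Claim_equal_multi_set : Prop := ∀ (string : String), Dom_multi_set string → Spec_multi_set string (multi_set string)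

-- ===== LEMMAS AND PROOFS =====

-- the good-pair test, the canonical middle form both ports are reduced to
def pvGood (a b : Char) : Bool :=
  decide ('A' ≤ a) && decide (a ≤ 'Z') && decide ('A' ≤ b) && decide (b ≤ 'Z')

-- canonical form: the good adjacent pairs of a character list
def pvGoodPairs (cs : List Char) : List String :=
  ((cs.zip cs.tail).filter (fun p => pvGood p.1 p.2)).map (fun p => String.ofList [p.1, p.2])

-- A's negated four-way test with A's branch order equals the positive test
theorem pvStep (a b : Char) (acc : List String) :
    (if a < 'A' || a > 'Z' || b < 'A' || b > 'Z' then acc else acc ++ [String.ofList [a, b]]) =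
      (if pvGood a b then acc ++ [String.ofList [a, b]] else acc) := by
  unfold pvGood
  by_cases h1 : 'A' ≤ a <;> by_cases h2 : a ≤ 'Z' <;>
    by_cases h3 : 'A' ≤ b <;> by_cases h4 : b ≤ 'Z' <;>
    simp_all [not_le]

-- A's range-of-windows view coincides with the zip view
theorem pvZipView (cs : List Char) :
    (List.range ((cs.length : Int) - 1).toNat).map (fun k => (cs.drop k).take 2) =
      (cs.zip cs.tail).map (fun p => [p.1, p.2]) := by
  induction cs with
  | nil => simp
  | cons c0 rest ih =>
    cases rest with
    | nil => simp
    | cons c1 rest' =>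
      have hlen : (((c0 :: c1 :: rest').length : Int) - 1).toNat =
          (((c1 :: rest').length : Int) - 1).toNat + 1 := by
        simp
      rw [hlen, List.range_succ_eq_map]
      simp only [List.tail_cons] at ih ⊢
      simp only [List.map_cons, List.map_map, List.zip_cons_cons]
      refine congrArg₂ List.cons (by simp) ?_
      rw [← ih]
      apply List.map_congr_left
      intro k _
      simp [Function.comp]

-- ===== A reduces to the canonical form =====
theorem multi_set_eq_good (string : String) : multi_set string = pvGoodPairs string.toList := by
  unfold multi_set pvGoodPairs
  set cs := string.toList with hcs
  rw [PySem.List.foldl_congr_mem _ _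
    (fun (ans : List String) (i : Int) =>
      if pvGood (((cs.drop i.toNat).take 2).headI) (((cs.drop i.toNat).take 2).getD 1 'A') then
        ans ++ [String.ofList ((cs.drop i.toNat).take 2)]
      else ans) _ ?_]
  · rw [PySem.List.foldl_append_if, List.nil_append]
    have hb : PySem.Str.len string - 1 - 0 = (cs.length : Int) - 1 := by
      rw [PySem.Str.len_eq, ← hcs]
      ring
    rw [PySem.List.pyRange_one, hb, List.filter_map, List.map_map]
    have hfil : ((fun i : Int => pvGood ((cs.drop i.toNat).take 2).headI
            (((cs.drop i.toNat).take 2).getD 1 'A')) ∘ (fun k : Nat => 0 + (k : Int))) =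
        (fun l : List Char => pvGood l.headI (l.getD 1 'A')) ∘ (fun k : Nat => (cs.drop k).take 2) := by
      funext k; simp [Function.comp]
    have hmapf : ((fun i : Int => String.ofList ((cs.drop i.toNat).take 2)) ∘
            (fun k : Nat => 0 + (k : Int))) =
        String.ofList ∘ (fun k : Nat => (cs.drop k).take 2) := by
      funext k; simp [Function.comp]
    rw [hfil, hmapf, ← List.map_map, ← List.filter_map, pvZipView cs, List.filter_map, List.map_map]
    have hq : ((fun l : List Char => pvGood l.headI (l.getD 1 'A')) ∘
            (fun p : Char × Char => [p.1, p.2])) =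
        (fun p : Char × Char => pvGood p.1 p.2) := by
      funext p
      rfl
    rw [hq]
    rfl
  · intro acc i hi
    rw [PySem.List.mem_pyRange_one] at hi
    obtain ⟨h0, hlt⟩ := hi
    have hilen : i.toNat + 1 < cs.length := by
      have hl := PySem.Str.len_eq string
      rw [← hcs] at hl
      omega
    have hsl : PySem.List.slice cs (some i) (some (i + 2)) = (cs.drop i.toNat).take 2 := by
      rw [PySem.List.slice_toNat cs h0 (by omega)]
      congr 1
      omega
    obtain ⟨x, y, t, hxy⟩ : ∃ x y t, cs.drop i.toNat = x :: y :: t :=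
      ⟨_, _, _, by
        rw [List.drop_eq_getElem_cons (by omega : i.toNat < cs.length),
            List.drop_eq_getElem_cons hilen]⟩
    have hpair : (cs.drop i.toNat).take 2 = [x, y] := by rw [hxy]; rfl
    have hg0 : PySem.List.pyGetD ([x, y] : List Char) 0 'A' = x := rfl
    have hg1 : PySem.List.pyGetD ([x, y] : List Char) 1 'A' = y := rfl
    simp only [hsl, hpair, hg0, hg1, List.headI_cons, List.getD_cons_succ, List.getD_cons_zero]
    exact pvStep _ _ acc

-- ===== B reduces to the canonical form =====

-- B's index view of a run coincides with the zip view
theorem pvIdxView (l : List Char) :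
    (List.range (l.length - 1)).map (fun i => ([l.getD i 'A', l.getD (i + 1) 'A'] : List Char)) =
      (l.zip l.tail).map (fun p => [p.1, p.2]) := by
  induction l with
  | nil => simp
  | cons c0 rest ih =>
    cases rest with
    | nil => simp
    | cons c1 rest' =>
      have hlen : (c0 :: c1 :: rest').length - 1 = ((c1 :: rest').length - 1) + 1 := by simp
      rw [hlen, List.range_succ_eq_map]
      simp only [List.tail_cons] at ih ⊢
      simp only [List.map_cons, List.map_map, List.zip_cons_cons]
      refine congrArg₂ List.cons (by simp) ?_
      rw [← ih]
      apply List.map_congr_left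
      intro k _
      simp [Function.comp]

-- pvGood is the conjunction of the two per-character tests
theorem pvGood_eq (a b : Char) : pvGood a b = (pvIsUp a && pvIsUp b) := by
  simp [pvGood, pvIsUp, Bool.and_assoc]

theorem pvGood_bad_left (c y : Char) (hc : pvIsUp c = false) : pvGood c y = false := by
  rw [pvGood_eq, hc, Bool.false_and]

theorem pvGood_bad_right (x c : Char) (hc : pvIsUp c = false) : pvGood x c = false := by
  rw [pvGood_eq, hc, Bool.and_false]

-- a run of uppercase characters expands to exactly its good pairs (all of them)
theorem pvExpand_eq_good (run : List Char) (h : run.all pvIsUp = true) :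
    pvExpand run = pvGoodPairs run := by
  unfold pvExpand pvGoodPairs
  have hmm : (fun i => String.ofList [run.getD i 'A', run.getD (i + 1) 'A']) =
      String.ofList ∘ (fun i => ([run.getD i 'A', run.getD (i + 1) 'A'] : List Char)) := rfl
  rw [hmm, ← List.map_map, pvIdxView, List.map_map]
  have hfil : (run.zip run.tail).filter (fun p => pvGood p.1 p.2) = run.zip run.tail := by
    apply List.filter_eq_self.mpr
    intro p hp
    obtain ⟨h1, h2⟩ := List.of_mem_zip hp
    have h2' : p.2 ∈ run := List.mem_of_mem_tail h2
    have g1 : pvIsUp p.1 = true := List.all_eq_true.mp h p.1 h1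
    have g2 : pvIsUp p.2 = true := List.all_eq_true.mp h p.2 h2'
    rw [pvGood_eq, g1, g2]
    rfl
  rw [hfil]
  rfl

-- cons-unfolding of pvGoodPairs
theorem pvGoodPairs_cons (x : Char) (l : List Char) :
    pvGoodPairs (x :: l) =
      (match l with
       | [] => []
       | y :: _ => if pvGood x y then [String.ofList [x, y]] else []) ++ pvGoodPairs l := by
  cases l with
  | nil => rfl
  | cons y t =>
    unfold pvGoodPairs
    simp only [List.tail_cons, List.zip_cons_cons, List.filter_cons]
    by_cases h : pvGood x y = true <;> simp [h]

-- a bad leading character contributes nothing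
theorem pvGoodPairs_cons_bad (c : Char) (l : List Char) (hc : pvIsUp c = false) :
    pvGoodPairs (c :: l) = pvGoodPairs l := by
  rw [pvGoodPairs_cons]
  cases l with
  | nil => rfl
  | cons y t => simp [pvGood_bad_left c y hc]

-- a bad separator splits pvGoodPairs
theorem pvGoodPairs_split (l : List Char) (c : Char) (rest : List Char) (hc : pvIsUp c = false) :
    pvGoodPairs (l ++ c :: rest) = pvGoodPairs l ++ pvGoodPairs rest := by
  induction l with
  | nil => simpa using pvGoodPairs_cons_bad c rest hc
  | cons x l' ih =>
    rw [List.cons_append, pvGoodPairs_cons, ih, pvGoodPairs_cons x l']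
    cases l' with
    | nil => simp [pvGood_bad_right x c hc, pvGoodPairs]
    | cons z t => simp

-- the main invariant of B's stage-1 loop
theorem pvRuns_good (cs : List Char) : ∀ cur, cur.all pvIsUp = true →
    (pvRuns cs cur).flatMap pvExpand = pvGoodPairs (cur ++ cs) := by
  induction cs with
  | nil =>
    intro cur hcur
    unfold pvRuns
    cases cur with
    | nil => rfl
    | cons x t => simp [pvExpand_eq_good _ hcur]
  | cons c rest ih =>
    intro cur hcur
    unfold pvRuns
    by_cases hup : pvIsUp c = true
    · rw [if_pos hup, ih (cur ++ [c]) (by simp_all), List.append_assoc]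
      rfl
    · have hup' : pvIsUp c = false := by simp_all
      rw [if_neg (by simp [hup'])]
      cases cur with
      | nil =>
        simp only [List.isEmpty_nil, if_true]
        rw [ih [] rfl, List.nil_append, List.nil_append, pvGoodPairs_cons_bad c rest hup']
      | cons x t =>
        rw [if_neg (by simp), List.flatMap_cons, ih [] rfl, List.nil_append,
          pvExpand_eq_good _ hcur, pvGoodPairs_split (x :: t) c rest hup']

theorem multi_set_alt_eq_good (string : String) :
    multi_set_alt string = pvGoodPairs string.toList := by
  unfold multi_set_alt
  rw [pvRuns_good string.toList [] rfl, List.nil_append]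

-- ===== VERDICT (by name: the statement is the Claim_ definition above) =====
theorem multi_set_spec : Claim_equal_multi_set := by
  intro string _
  unfold Spec_multi_set
  rw [multi_set_eq_good, multi_set_alt_eq_good]
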